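-- pv_equiv track=rewrite | github.com/pbpo/novelengine | story_engine/engine/canon_action.py | _actor_lines
-- ===== SOURCE A (Python) =====
-- from typing import List, Tuple
--
-- def _actor_lines(text: str, actor: str) -> List[str]:
--     lines = [ln.strip() for ln in (text or "").splitlines() if ln.strip()]
--     idxs = [i for i, ln in enumerate(lines) if actor in ln]
--     window: List[str] = []
--     seen: set[str] = set()
--     for idx in idxs:
--         for pos in (idx - 1, idx, idx + 1):
--             if 0 <= pos < len(lines):
--                 ln = lines[pos]
--                 if ln not in seen:
--                     seen.add(ln)
--                     window.append(ln)
--     return window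
-- ===== SOURCE B (Python) =====
-- from typing import List
--
-- def _actor_lines(text: str, actor: str) -> List[str]:
--     lines = [ln.strip() for ln in (text or "").splitlines() if ln.strip()]
--     marked: set[int] = set()
--     for i, ln in enumerate(lines):
--         if actor in ln:
--             marked.update((i - 1, i, i + 1))
--     out: List[str] = []
--     seen: set[str] = set()
--     for i, ln in enumerate(lines):
--         if i in marked and ln not in seen:
--             seen.add(ln)
--             out.append(ln)
--     return out
-- ===== Notes on version B (the rewrite author's own statement) =====
-- stated objective: alternative
-- what changed: Replaces the nested match-loop that expands a 3-line window per matching index (dedup while expanding) with two independent linear passes: first build a set of marked positions from all matches, then scan positions in ascending order once, emitting each marked line on its first unseen occurrence.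
import Mathlib
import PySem

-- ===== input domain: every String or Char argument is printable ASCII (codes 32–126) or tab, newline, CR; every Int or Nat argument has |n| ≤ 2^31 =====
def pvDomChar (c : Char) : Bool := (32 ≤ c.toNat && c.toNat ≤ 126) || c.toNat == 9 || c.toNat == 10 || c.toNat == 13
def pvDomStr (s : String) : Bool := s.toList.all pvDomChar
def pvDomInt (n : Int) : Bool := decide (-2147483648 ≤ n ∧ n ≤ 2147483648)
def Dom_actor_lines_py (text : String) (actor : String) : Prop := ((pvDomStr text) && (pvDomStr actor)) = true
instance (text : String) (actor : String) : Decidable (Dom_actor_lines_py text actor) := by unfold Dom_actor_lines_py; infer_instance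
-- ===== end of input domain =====

-- B replaces A's nested window-expansion loop by two independent linear passes (mark positions,
-- then one ascending positional scan with content dedup); same return value, no speed claim.

-- ===== PORT A =====
-- shared by both ports: lines = [ln.strip() for ln in (text or "").splitlines() if ln.strip()]
def alLines (text : String) : List String :=
  ((PySem.Str.splitlines (if text = "" then "" else text)).filter
      (fun ln => PySem.Str.strip ln != "")).map PySem.Str.strip

-- idxs = [i for i, ln in enumerate(lines) if actor in ln]
def aIdxs (lines : List String) (actor : String) : List Int :=
  ((PySem.List.enumerate lines).filter (fun p => PySem.Str.isIn actor p.2)).map (fun p => p.1)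

-- the body of A's inner loop (window, seen), one position pos
def aStep (lines : List String) (st : List String × PySem.Set String) (pos : Int) :
    List String × PySem.Set String :=
  if 0 ≤ pos ∧ pos < (lines.length : Int) then
    match PySem.List.pyGet? lines pos with
    | some ln =>
        if PySem.Set.contains st.2 ln then st else (st.1 ++ [ln], PySem.Set.add st.2 ln)
    | none => st
  else st

def actor_lines_py (text : String) (actor : String) : List String :=
  let lines := alLines text
  ((aIdxs lines actor).foldl
      (fun st idx => [idx - 1, idx, idx + 1].foldl (aStep lines) st)
      ([], PySem.Set.empty)).1

-- ===== PORT B =====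
-- first pass: marked = set of i-1, i, i+1 for every line containing actor
def bMarked (lines : List String) (actor : String) : PySem.Set Int :=
  (PySem.List.enumerate lines).foldl
    (fun m p =>
      if PySem.Str.isIn actor p.2 then PySem.Set.update m [p.1 - 1, p.1, p.1 + 1] else m)
    PySem.Set.empty

-- second pass: one ascending positional scan with content dedup
def actor_lines_py_alt (text : String) (actor : String) : List String :=
  let lines := alLines text
  let marked := bMarked lines actor
  ((PySem.List.enumerate lines).foldl
      (fun (st : List String × PySem.Set String) p =>
        if PySem.Set.contains marked p.1 && !(PySem.Set.contains st.2 p.2) then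
          (st.1 ++ [p.2], PySem.Set.add st.2 p.2)
        else st)
      ([], PySem.Set.empty)).1

-- ===== PRECONDITION & SPEC =====
def Spec_actor_lines_py (text : String) (actor : String) (out : List String) : Prop := out = actor_lines_py_alt text actor
instance (text : String) (actor : String) (out : List String) : Decidable (Spec_actor_lines_py text actor out) := by unfold Spec_actor_lines_py; infer_instance

-- ===== CLAIM (what is proved, stated in full; the proofs are below) =====
def Claim_equal_actor_lines_py : Prop := ∀ (text : String) (actor : String), Dom_actor_lines_py text actor → Spec_actor_lines_py text actor (actor_lines_py text actor)

-- ===== LEMMAS AND PROOFS =====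

-- generic "dedup-append" fold both loops reduce to
def ddStep (st : List String × PySem.Set String) (ln : String) : List String × PySem.Set String :=
  if PySem.Set.contains st.2 ln then st else (st.1 ++ [ln], PySem.Set.add st.2 ln)

def dd (st : List String × PySem.Set String) (w : List String) : List String × PySem.Set String :=
  w.foldl ddStep st

def near (i p : Int) : Bool := decide (i - 1 ≤ p ∧ p ≤ i + 1)
def nearAny (I : List Int) (p : Int) : Bool := I.any (fun i => near i p)
-- the marked positions of [0, lines.length) in ascending order
def vis (lines : List String) (I : List Int) : List Int :=
  (PySem.List.pyRange 0 (lines.length : Int)).filter (nearAny I)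
def lineAt (lines : List String) (p : Int) : String := PySem.List.pyGetD lines p ""

theorem dd_append (st : List String × PySem.Set String) (w1 w2 : List String) :
    dd st (w1 ++ w2) = dd (dd st w1) w2 := List.foldl_append ..

theorem dd_seen_mem (w : List String) (st : List String × PySem.Set String) (s : String) :
    s ∈ (dd st w).2 ↔ s ∈ st.2 ∨ s ∈ w := by
  induction w generalizing st with
  | nil => simp [dd]
  | cons a w ih =>
    show s ∈ (dd (ddStep st a) w).2 ↔ _
    rw [ih]
    unfold ddStep
    by_cases h : PySem.Set.contains st.2 a = true
    · have ha : a ∈ st.2 := (PySem.Set.contains_iff _ _).1 h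
      simp only [h, if_pos, List.mem_cons]
      constructor
      · tauto
      · rintro (h1 | rfl | h1) <;> tauto
    · simp only [h, if_neg, Bool.false_eq_true, not_false_iff]
      simp only [PySem.Set.mem_add, List.mem_cons]
      constructor
      · rintro ((h1 | rfl) | h1) <;> tauto
      · rintro (h1 | rfl | h1) <;> tauto

theorem dd_filter_seen (w : List String) (st : List String × PySem.Set String)
    (s0 : PySem.Set String) (h : ∀ x ∈ s0, x ∈ st.2) :
    dd st (w.filter (fun x => !(PySem.Set.contains s0 x))) = dd st w := by
  induction w generalizing st with
  | nil => rfl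
  | cons a w ih =>
    by_cases ha : PySem.Set.contains s0 a = true
    · have ha2 : PySem.Set.contains st.2 a = true :=
        (PySem.Set.contains_iff _ _).2 (h a ((PySem.Set.contains_iff _ _).1 ha))
      have hdd : dd st (a :: w) = dd st w := by
        show dd (ddStep st a) w = dd st w
        unfold ddStep; rw [ha2]; simp
      have ha' : a ∈ s0 := (PySem.Set.contains_iff s0 a).1 ha
      rw [hdd, ← ih st h, List.filter_cons, if_neg (by simp [ha'])]
    · have ha' : a ∉ s0 := fun hm => ha ((PySem.Set.contains_iff s0 a).2 hm)
      rw [List.filter_cons, if_pos (by simp [ha'])]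
      show dd (ddStep st a) _ = dd (ddStep st a) w
      apply ih
      intro x hx
      have := h x hx
      unfold ddStep
      split
      · exact this
      · exact (PySem.Set.mem_add _ _ _).2 (Or.inl this)

theorem filter_map_filter (V : List Int) (r : Int → Bool) (q : String → Bool) (f : Int → String)
    (h : ∀ p ∈ V, r p = false → q (f p) = false) :
    ((V.filter r).map f).filter q = (V.map f).filter q := by
  induction V with
  | nil => rfl
  | cons a V ih =>
    have ih' := ih (fun p hp => h p (List.mem_cons_of_mem a hp))
    by_cases hr : r a = true
    · rw [List.filter_cons, if_pos hr]
      simp only [List.map_cons, List.filter_cons, ih']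
    · have hq : q (f a) = false := h a (List.mem_cons_self ..) (by simpa using hr)
      rw [List.filter_cons, if_neg (by simp [hr]), List.map_cons, List.filter_cons,
        if_neg (by simp [hq]), ih']

theorem get_some (lines : List String) (pos : Int) (h0 : 0 ≤ pos) (h1 : pos < (lines.length : Int)) :
    PySem.List.pyGet? lines pos = some (lineAt lines pos) := by
  obtain ⟨k, rfl⟩ : ∃ k : Nat, pos = (k : Int) := ⟨pos.toNat, (Int.toNat_of_nonneg h0).symm⟩
  have hk : k < lines.length := by exact_mod_cast h1
  simp [lineAt, PySem.List.pyGetD, hk]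

theorem windowFold (lines : List String) (L : List Int) (st : List String × PySem.Set String) :
    L.foldl (aStep lines) st
      = dd st ((L.filter (fun p => decide (0 ≤ p ∧ p < (lines.length : Int)))).map (lineAt lines)) := by
  induction L generalizing st with
  | nil => rfl
  | cons pos L ih =>
    by_cases hp : 0 ≤ pos ∧ pos < (lines.length : Int)
    · have : aStep lines st pos = ddStep st (lineAt lines pos) := by
        unfold aStep ddStep
        rw [if_pos hp, get_some lines pos hp.1 hp.2]
      simp only [List.foldl_cons, this, List.filter_cons, hp]
      exact ih (ddStep st (lineAt lines pos))
    · have : aStep lines st pos = st := by unfold aStep; rw [if_neg hp]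
      simp only [List.foldl_cons, this, List.filter_cons, hp]
      exact ih st

theorem sorted_ext {l1 l2 : List Int} (h1 : l1.Pairwise (· < ·)) (h2 : l2.Pairwise (· < ·))
    (hm : ∀ x, x ∈ l1 ↔ x ∈ l2) : l1 = l2 := by
  have n1 : l1.Nodup := h1.imp (fun h => Int.ne_of_lt h)
  have n2 : l2.Nodup := h2.imp (fun h => Int.ne_of_lt h)
  have hp : l1.Perm l2 := (List.perm_ext_iff_of_nodup n1 n2).2 hm
  exact List.Perm.eq_of_pairwise (fun a b _ _ hab hba => by omega) h1 h2 hp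

theorem window_eq (lines : List String) (i : Int) (h0 : 0 ≤ i) (h1 : i < (lines.length : Int)) :
    [i - 1, i, i + 1].filter (fun p => decide (0 ≤ p ∧ p < (lines.length : Int)))
      = (PySem.List.pyRange 0 (lines.length : Int)).filter (near i) := by
  apply sorted_ext
  · apply List.Pairwise.sublist List.filter_sublist
    refine List.pairwise_cons.2 ⟨?_, List.pairwise_cons.2 ⟨?_, List.pairwise_singleton ..⟩⟩ <;>
      · intro x hx
        simp only [List.mem_cons, List.not_mem_nil, or_false] at hx
        rcases hx with rfl | rfl <;> omega
  · exact List.Pairwise.sublist List.filter_sublist (PySem.List.pairwise_lt_pyRange_one 0 _)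
  · intro x
    simp only [List.mem_filter, List.mem_cons, List.not_mem_nil, or_false,
      PySem.List.mem_pyRange_one, near, decide_eq_true_iff]
    omega

theorem vis_nil (lines : List String) : vis lines [] = [] := by
  simp [vis, nearAny]

theorem nearAny_append (I : List Int) (i p : Int) :
    nearAny (I ++ [i]) p = (nearAny I p || near i p) := by
  simp [nearAny]

theorem vis_split (lines : List String) (I : List Int) (i : Int)
    (hI : ∀ j ∈ I, j < i) :
    vis lines (I ++ [i])
      = vis lines I
        ++ (PySem.List.pyRange 0 (lines.length : Int)).filter
             (fun p => near i p && !(nearAny I p)) := by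
  apply sorted_ext
  · exact List.Pairwise.sublist List.filter_sublist (PySem.List.pairwise_lt_pyRange_one 0 _)
  · rw [List.pairwise_append]
    refine ⟨List.Pairwise.sublist List.filter_sublist (PySem.List.pairwise_lt_pyRange_one 0 _),
      List.Pairwise.sublist List.filter_sublist (PySem.List.pairwise_lt_pyRange_one 0 _), ?_⟩
    intro p hp q hq
    simp only [vis, List.mem_filter, PySem.List.mem_pyRange_one] at hp hq
    obtain ⟨⟨hp0, hp1⟩, hpn⟩ := hp
    obtain ⟨⟨hq0, hq1⟩, hqn⟩ := hq
    rw [Bool.and_eq_true, Bool.not_eq_true'] at hqn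
    obtain ⟨hqi, hqI⟩ := hqn
    rw [nearAny, List.any_eq_true] at hpn
    obtain ⟨j, hjI, hjp⟩ := hpn
    have hjq : ¬ near j q = true := by
      rw [nearAny, List.any_eq_false] at hqI
      exact hqI j hjI
    have hji : j < i := hI j hjI
    simp only [near, decide_eq_true_iff] at hjp hjq hqi
    omega
  · intro x
    simp only [vis, List.mem_append, List.mem_filter, PySem.List.mem_pyRange_one,
      nearAny_append, Bool.or_eq_true, Bool.and_eq_true, Bool.not_eq_true']
    by_cases hx : nearAny I x = true <;> simp [hx]

theorem A_main (lines : List String) (I : List Int)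
    (hpw : I.Pairwise (· < ·)) (hb : ∀ j ∈ I, 0 ≤ j ∧ j < (lines.length : Int)) :
    I.foldl (fun st idx => [idx - 1, idx, idx + 1].foldl (aStep lines) st)
        ([], PySem.Set.empty)
      = dd ([], PySem.Set.empty) ((vis lines I).map (lineAt lines)) := by
  induction I using List.reverseRecOn with
  | nil => simp [vis_nil, dd]
  | append_singleton I i ih =>
    have hpwI : I.Pairwise (· < ·) := hpw.sublist (List.sublist_append_left _ _)
    have hlt : ∀ j ∈ I, j < i := by
      rw [List.pairwise_append] at hpw
      exact fun j hj => hpw.2.2 j hj i (List.mem_singleton_self i)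
    have hbI : ∀ j ∈ I, 0 ≤ j ∧ j < (lines.length : Int) :=
      fun j hj => hb j (List.mem_append_left _ hj)
    have hbi : 0 ≤ i ∧ i < (lines.length : Int) := hb i (List.mem_append_right _ (List.mem_singleton_self i))
    rw [List.foldl_append]
    rw [ih hpwI hbI]
    set stM := dd ([], PySem.Set.empty) ((vis lines I).map (lineAt lines)) with hstM
    have hseen : ∀ p, p ∈ vis lines I → PySem.Set.contains stM.2 (lineAt lines p) = true := by
      intro p hp
      apply (PySem.Set.contains_iff _ _).2
      rw [hstM, dd_seen_mem]
      right
      exact List.mem_map_of_mem hp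
    show [i - 1, i, i + 1].foldl (aStep lines) stM = _
    rw [windowFold, window_eq lines i hbi.1 hbi.2]
    set K := (PySem.List.pyRange 0 (lines.length : Int)).filter
      (fun p => near i p && !(nearAny I p)) with hK
    have hKfil : K = ((PySem.List.pyRange 0 (lines.length : Int)).filter (near i)).filter
        (fun p => !(nearAny I p)) := by
      rw [List.filter_filter, hK]
      exact List.filter_congr (fun p _ => by rw [Bool.and_comm])
    have step1 : dd stM (((PySem.List.pyRange 0 (lines.length : Int)).filter (near i)).map (lineAt lines))
        = dd stM (K.map (lineAt lines)) := by
      rw [← dd_filter_seen (((PySem.List.pyRange 0 (lines.length : Int)).filter (near i)).map (lineAt lines))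
            stM stM.2 (fun x hx => hx),
          ← dd_filter_seen (K.map (lineAt lines)) stM stM.2 (fun x hx => hx)]
      congr 1
      rw [hKfil]
      apply (filter_map_filter _ _ _ _ _).symm
      intro p hp hr
      simp only [List.mem_filter, PySem.List.mem_pyRange_one] at hp
      rw [Bool.not_eq_false'] at hr
      have hpv : p ∈ vis lines I := by
        simp only [vis, List.mem_filter, PySem.List.mem_pyRange_one]
        exact ⟨hp.1, hr⟩
      have hmem : lineAt lines p ∈ stM.2 := (PySem.Set.contains_iff _ _).1 (hseen p hpv)
      simp [hmem]
    rw [step1, hstM, ← dd_append, ← List.map_append, ← vis_split lines I i hlt]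

-- B side: membership in the marked set after the first pass
theorem bMarked_fold (actor : String) (l : List (Int × String)) (m : PySem.Set Int) (p : Int) :
    p ∈ (l.foldl
        (fun m q =>
          if PySem.Str.isIn actor q.2 then PySem.Set.update m [q.1 - 1, q.1, q.1 + 1] else m) m)
      ↔ p ∈ m ∨ ∃ q ∈ l, PySem.Str.isIn actor q.2 = true ∧ near q.1 p = true := by
  induction l generalizing m with
  | nil => simp
  | cons a l ih =>
    simp only [List.foldl_cons]
    by_cases ha : PySem.Str.isIn actor a.2 = true
    · rw [if_pos ha, ih]
      have hmem : p ∈ PySem.Set.update m [a.1 - 1, a.1, a.1 + 1] ↔ p ∈ m ∨ near a.1 p = true := by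
        rw [PySem.Set.update_eq_append_filter]
        simp only [List.mem_append, List.mem_filter, PySem.Set.mem_ofList, List.mem_cons,
          List.not_mem_nil, or_false, near, decide_eq_true_iff]
        constructor
        · rintro (h | ⟨h, -⟩)
          · exact Or.inl h
          · right; omega
        · rintro (h | h)
          · exact Or.inl h
          · by_cases hm : p ∈ m
            · exact Or.inl hm
            · refine Or.inr ⟨by omega, ?_⟩
              simp [hm]
      rw [hmem]
      constructor
      · rintro ((h | h) | h)
        · exact Or.inl h
        · exact Or.inr ⟨a, List.mem_cons_self .., ha, h⟩
        · obtain ⟨q, hq, h1, h2⟩ := h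
          exact Or.inr ⟨q, List.mem_cons_of_mem _ hq, h1, h2⟩
      · rintro (h | ⟨q, hq, h1, h2⟩)
        · exact Or.inl (Or.inl h)
        · rcases List.mem_cons.1 hq with rfl | hq
          · exact Or.inl (Or.inr h2)
          · exact Or.inr ⟨q, hq, h1, h2⟩
    · rw [if_neg ha, ih]
      constructor
      · rintro (h | ⟨q, hq, h1, h2⟩)
        · exact Or.inl h
        · exact Or.inr ⟨q, List.mem_cons_of_mem _ hq, h1, h2⟩
      · rintro (h | ⟨q, hq, h1, h2⟩)
        · exact Or.inl h
        · rcases List.mem_cons.1 hq with rfl | hq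
          · exact absurd h1 ha
          · exact Or.inr ⟨q, hq, h1, h2⟩

theorem bMarked_contains (lines : List String) (actor : String) (p : Int) :
    PySem.Set.contains (bMarked lines actor) p = nearAny (aIdxs lines actor) p := by
  rw [Bool.eq_iff_iff, PySem.Set.contains_iff]
  unfold bMarked
  rw [bMarked_fold]
  unfold nearAny aIdxs
  simp only [List.any_eq_true, List.mem_map, List.mem_filter]
  constructor
  · rintro (h | ⟨q, hq, h1, h2⟩)
    · simp [PySem.Set.empty] at h
    · exact ⟨q.1, ⟨q, ⟨hq, h1⟩, rfl⟩, h2⟩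
  · rintro ⟨i, ⟨q, ⟨hq, h1⟩, rfl⟩, h2⟩
    exact Or.inr ⟨q, hq, h1, h2⟩

theorem bLoop (l : List (Int × String)) (marked : PySem.Set Int)
    (st : List String × PySem.Set String) :
    l.foldl
        (fun (st : List String × PySem.Set String) p =>
          if PySem.Set.contains marked p.1 && !(PySem.Set.contains st.2 p.2) then
            (st.1 ++ [p.2], PySem.Set.add st.2 p.2)
          else st) st
      = dd st ((l.filter (fun p => PySem.Set.contains marked p.1)).map (·.2)) := by
  induction l generalizing st with
  | nil => rfl
  | cons a l ih =>
    by_cases hm : PySem.Set.contains marked a.1 = true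
    · have hstep : (if PySem.Set.contains marked a.1 && !(PySem.Set.contains st.2 a.2) then
          (st.1 ++ [a.2], PySem.Set.add st.2 a.2) else st) = ddStep st a.2 := by
        rw [hm]
        unfold ddStep
        by_cases hs : PySem.Set.contains st.2 a.2 = true <;> simp only [hs] <;> simp
      rw [List.foldl_cons, hstep, List.filter_cons, if_pos hm, List.map_cons]
      exact ih (ddStep st a.2)
    · rw [Bool.not_eq_true] at hm
      simp only [List.foldl_cons, hm, Bool.false_and, if_neg Bool.false_ne_true,
        List.filter_cons]
      exact ih st

theorem enum_filter_map (lines : List String) (I : List Int) :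
    ((PySem.List.enumerate lines).filter (fun p => nearAny I p.1)).map (·.2)
      = (vis lines I).map (lineAt lines) := by
  rw [PySem.List.enumerate_eq_map_pyRange lines ""]
  rw [List.filter_map, List.map_map]
  unfold vis lineAt
  simp [Function.comp_def, PySem.List.len]

theorem aIdxs_pairwise (lines : List String) (actor : String) :
    (aIdxs lines actor).Pairwise (· < ·) := by
  unfold aIdxs
  rw [List.pairwise_map]
  exact List.Pairwise.sublist List.filter_sublist (PySem.List.pairwise_lt_enumerate lines 0)

theorem aIdxs_bounds (lines : List String) (actor : String) :
    ∀ j ∈ aIdxs lines actor, 0 ≤ j ∧ j < (lines.length : Int) := by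
  intro j hj
  unfold aIdxs at hj
  obtain ⟨q, hq, rfl⟩ := List.mem_map.1 hj
  have hqe := (List.mem_filter.1 hq).1
  rw [PySem.List.mem_enumerate_iff] at hqe
  obtain ⟨k, hk, rfl⟩ := hqe
  constructor <;> simp [hk]

set_option maxHeartbeats 1000000 in
theorem main_eq (text : String) (actor : String) :
    actor_lines_py text actor = actor_lines_py_alt text actor := by
  unfold actor_lines_py actor_lines_py_alt
  dsimp only
  set lines := alLines text with hlines
  set I := aIdxs lines actor with hI
  rw [A_main lines I (aIdxs_pairwise lines actor) (aIdxs_bounds lines actor)]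
  rw [bLoop]
  congr 1
  have hfc : (PySem.List.enumerate lines).filter
        (fun p => PySem.Set.contains (bMarked lines actor) p.1)
      = (PySem.List.enumerate lines).filter (fun p => nearAny I p.1) := by
    apply List.filter_congr
    intro p _
    rw [bMarked_contains]
  rw [hfc, enum_filter_map]

-- ===== VERDICT (by name: the statement is the Claim_ definition above) =====
theorem actor_lines_py_spec : Claim_equal_actor_lines_py := by
  intro text actor _
  unfold Spec_actor_lines_py
  exact main_eq text actor
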